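-- pv_equiv track=rewrite | github.com/EnesSakalliUniWien/BranchArchitect | brancharchitect/jumping_taxa/matrix_ops.py | dependent_unique_solutions
-- ===== SOURCE A (Python) =====
-- def meet(sets):
--     """
--     Compute the meet (intersection) of a collection of sets.
--     In a Boolean lattice, the meet is just the intersection.
--     If sets is empty, returns the empty set.
--     """
--     it = iter(sets)
--     try:
--         result = next(it).copy()
--     except StopIteration:
--         return set()  # No sets provided.
--     for s in it:
--         result &= s
--     return result
--
-- def compute_row_intersections(matrix):
--     """
--     Given a matrix represented as a list of rows (each row is an iterable of blocks,
--     and each block is a set), compute the intersection (the meet) for each row.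
--
--     Returns a list where each entry is the intersection set for that row.
--     """
--     intersections = []
--     for idx, row in enumerate(matrix):
--         inter = meet(row)
--         intersections.append(inter)
--     return intersections
--
-- def infer_mapping(matrix1, matrix2):
--     """
--     Infer a dependency mapping from the two matrices.
--     We assume both matrices have the same number of rows, n.
--     We infer the mapping as: pair row i of matrix1 with row (n-1-i) of matrix2.
--     For example, if n = 2, mapping = [(0,1), (1,0)].
--     """
--     n1 = len(matrix1)
--     n2 = len(matrix2)
--     if n1 != n2:
--         raise ValueError(
--             "Matrices must have the same number of rows to infer mapping automatically."
--         )
--     n = n1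
--     mapping = [(i, n - 1 - i) for i in range(n)]
--     return mapping
--
-- def dependent_unique_solutions(matrix1, matrix2):
--     """
--     Returns only those dependent solutions for which the intersections in the mapped rows
--     are singletons. For each mapping (i, j), if the intersection set from matrix1's row i
--     and matrix2's row j are both singletons, that unique pair is returned.
--     Returns a list of unique solution tuples.
--     """
--     inters1 = compute_row_intersections(matrix1)
--     inters2 = compute_row_intersections(matrix2)
--     mapping = infer_mapping(matrix1, matrix2)
--     unique_solutions = []
--     for i, j in mapping:
--         if len(inters1[i]) == 1 and len(inters2[j]) == 1:
--             a = next(iter(inters1[i]))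
--             b = next(iter(inters2[j]))
--             unique_solutions.append((a, b))
--     return unique_solutions
-- ===== SOURCE B (Python) =====
-- def _sole_common(row):
--     # Tally, per element, how many blocks of the row contain it; the row's
--     # intersection is a singleton iff exactly one element is counted in all
--     # k blocks (and k >= 1).  Returns that element, or None.
--     count = {}
--     k = 0
--     for block in row:
--         k += 1
--         for x in block:
--             count[x] = count.get(x, 0) + 1
--     sole = None
--     for x, c in count.items():
--         if c == k:
--             if sole is not None:
--                 return None
--             sole = x
--     return sole
--
-- def dependent_unique_solutions(matrix1, matrix2):
--     if len(matrix1) != len(matrix2):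
--         raise ValueError(
--             "Matrices must have the same number of rows to infer mapping automatically."
--         )
--     out = []
--     for row1, row2 in zip(matrix1, reversed(matrix2)):
--         a = _sole_common(row1)
--         b = _sole_common(row2)
--         if a is not None and b is not None:
--             out.append((a, b))
--     return out
-- ===== Notes on version B (the rewrite author's own statement) =====
-- stated objective: alternative
-- what changed: Replaces A's set intersections over three precomputed lists (two row-intersection lists plus an index mapping) with a per-row hash tally (dict counting in how many blocks each element occurs; the intersection is a singleton iff exactly one element reaches the block count) driven by one zip of matrix1 with reversed(matrix2), so no set operation and no index arithmetic remain.
import Mathlib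
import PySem

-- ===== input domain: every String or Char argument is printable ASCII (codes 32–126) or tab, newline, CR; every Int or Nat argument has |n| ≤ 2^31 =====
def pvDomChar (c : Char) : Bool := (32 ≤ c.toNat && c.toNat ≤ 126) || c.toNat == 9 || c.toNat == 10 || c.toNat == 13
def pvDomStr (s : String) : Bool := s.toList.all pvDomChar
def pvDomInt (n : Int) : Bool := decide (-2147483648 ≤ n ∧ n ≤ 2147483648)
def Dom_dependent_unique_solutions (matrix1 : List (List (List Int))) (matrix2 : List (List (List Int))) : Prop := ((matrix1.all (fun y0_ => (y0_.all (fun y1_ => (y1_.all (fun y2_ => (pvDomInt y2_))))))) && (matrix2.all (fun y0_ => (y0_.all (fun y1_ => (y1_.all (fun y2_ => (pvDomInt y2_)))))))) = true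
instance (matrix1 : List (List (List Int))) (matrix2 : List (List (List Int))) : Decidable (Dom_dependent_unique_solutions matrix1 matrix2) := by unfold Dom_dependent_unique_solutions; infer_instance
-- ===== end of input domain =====

-- B replaces A's set intersections over three precomputed lists (two row-intersection lists and
-- an index mapping) by a per-row hash tally — a dict counting in how many blocks each element
-- occurs; the intersection is a singleton iff exactly one element reaches the block count —
-- driven by one zip of matrix1 with reversed(matrix2) (objective: alternative; same asymptotic cost).

-- ===== PORT A =====
-- meet(sets): first set copied, then '&=' each following set
def pvMeet (row : List (List Int)) : PySem.Set Int :=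
  match row with
  | [] => PySem.Set.empty
  | s :: rest => rest.foldl (fun r t => PySem.Set.inter r t) (PySem.Set.ofList s)

-- compute_row_intersections: one intersection per row, in order
def pvRowInters (matrix : List (List (List Int))) : List (PySem.Set Int) :=
  matrix.map pvMeet

def dependent_unique_solutions (matrix1 : List (List (List Int))) (matrix2 : List (List (List Int))) : List (Int × Int) :=
  let inters1 := pvRowInters matrix1
  let inters2 := pvRowInters matrix2
  let n : Int := matrix1.length
  -- infer_mapping (its ValueError when the row counts differ is excluded by Pre_)
  let mapping := (PySem.List.pyRange 0 n 1).map (fun i => (i, n - 1 - i))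
  mapping.foldl (fun acc ij =>
    let s := PySem.List.pyGetD inters1 ij.1 []
    let t := PySem.List.pyGetD inters2 ij.2 []
    if s.length = 1 ∧ t.length = 1 then acc ++ [(s.headD 0, t.headD 0)] else acc) []

-- ===== PORT B =====
-- _sole_common's first loop: count[x] = count.get(x, 0) + 1 over every block's elements
-- (each block is a Python set, so its elements are iterated once each; the tally and the
-- returned sole element do not depend on that iteration order)
def pvTally (row : List (List Int)) : PySem.Dict Int Int :=
  row.foldl (fun d blk => (PySem.Set.ofList blk).foldl (fun d x => d.modify x 0 (· + 1)) d) PySem.Dict.empty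

-- _sole_common's second loop over count.items(), with its early 'return None' on a second hit
def pvFindSole (k : Int) : List (Int × Int) → Option Int → Option Int
  | [], sole => sole
  | (x, c) :: rest, sole =>
      if c = k then
        match sole with
        | some _ => none
        | none => pvFindSole k rest (some x)
      else pvFindSole k rest sole

-- _sole_common (its counter k ends up as len(row))
def pvSoleCommon (row : List (List Int)) : Option Int :=
  pvFindSole (row.length : Int) (pvTally row).items none

def dependent_unique_solutions_alt (matrix1 : List (List (List Int))) (matrix2 : List (List (List Int))) : List (Int × Int) :=
  -- the ValueError branch when the row counts differ is excluded by Pre_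
  (matrix1.zip matrix2.reverse).foldl (fun acc rr =>
    match pvSoleCommon rr.1, pvSoleCommon rr.2 with
    | some a, some b => acc ++ [(a, b)]
    | _, _ => acc) []

-- ===== PRECONDITION & SPEC =====
-- Both programs raise ValueError when the row counts differ; Pre_ excludes exactly those inputs.
def Pre_dependent_unique_solutions (matrix1 : List (List (List Int))) (matrix2 : List (List (List Int))) : Prop :=
  matrix1.length = matrix2.length
instance (matrix1 : List (List (List Int))) (matrix2 : List (List (List Int))) : Decidable (Pre_dependent_unique_solutions matrix1 matrix2) := by unfold Pre_dependent_unique_solutions; infer_instance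

def pvWitness_dependent_unique_solutions : List (List (List Int)) × List (List (List Int)) :=
  ([[[1, 2], [2, 3]], [[5]]], [[[7]], [[1], [2]]])

def Spec_dependent_unique_solutions (matrix1 : List (List (List Int))) (matrix2 : List (List (List Int))) (out : List (Int × Int)) : Prop := out = dependent_unique_solutions_alt matrix1 matrix2
instance (matrix1 : List (List (List Int))) (matrix2 : List (List (List Int))) (out : List (Int × Int)) : Decidable (Spec_dependent_unique_solutions matrix1 matrix2 out) := by unfold Spec_dependent_unique_solutions; infer_instance

-- ===== CLAIM (what is proved, stated in full; the proofs are below) =====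
def Claim_equal_dependent_unique_solutions : Prop := ∀ (matrix1 : List (List (List Int))) (matrix2 : List (List (List Int))), Dom_dependent_unique_solutions matrix1 matrix2 → Pre_dependent_unique_solutions matrix1 matrix2 → Spec_dependent_unique_solutions matrix1 matrix2 (dependent_unique_solutions matrix1 matrix2)

-- ===== LEMMAS AND PROOFS =====

-- A's iterated intersection is one filter of the first block
lemma foldl_inter_eq_filter (rest : List (List Int)) (acc : PySem.Set Int) :
    rest.foldl (fun r t => PySem.Set.inter r t) acc
      = acc.filter (fun x => rest.all (fun blk => blk.contains x)) := by
  induction rest generalizing acc with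
  | nil => simp
  | cons b rest ih =>
      rw [List.foldl_cons, ih]
      simp only [PySem.Set.inter, List.filter_filter, List.all_cons]
      congr 1
      funext x
      simp [Bool.and_comm]

-- the tally's value at v counts the blocks containing v
lemma tally_getD (row : List (List Int)) (d : PySem.Dict Int Int) (v : Int) :
    (row.foldl (fun d blk => (PySem.Set.ofList blk).foldl (fun d x => d.modify x 0 (· + 1)) d) d).getD v 0
      = d.getD v 0 + (row.countP (fun blk => decide (v ∈ blk)) : Int) := by
  induction row generalizing d with
  | nil => simp
  | cons b rest ih =>
      rw [List.foldl_cons, ih, PySem.Dict.getD_foldl_modify_add_one]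
      rw [List.countP_cons]
      by_cases hv : v ∈ b
      · rw [List.count_eq_one_of_mem (PySem.Set.nodup_ofList b) ((PySem.Set.mem_ofList b v).mpr hv)]
        simp [hv]; ring
      · rw [List.count_eq_zero.mpr (fun h => hv ((PySem.Set.mem_ofList b v).mp h))]
        simp [hv]

-- the tally's keys: nodup, and exactly the elements occurring in some block
lemma tally_keys_aux (row : List (List Int)) (d : PySem.Dict Int Int) :
    (row.foldl (fun d blk => (PySem.Set.ofList blk).foldl (fun d x => d.modify x 0 (· + 1)) d) d).keys
      = row.foldl (fun ks blk => PySem.Set.update ks (PySem.Set.ofList blk)) d.keys := by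
  induction row generalizing d with
  | nil => rfl
  | cons b rest ih =>
      rw [List.foldl_cons, ih, List.foldl_cons, PySem.Dict.keys_foldl_modify]

lemma mem_keysFold (row : List (List Int)) (ks : PySem.Set Int) (v : Int) :
    v ∈ row.foldl (fun ks blk => PySem.Set.update ks (PySem.Set.ofList blk)) ks
      ↔ v ∈ ks ∨ ∃ blk ∈ row, v ∈ blk := by
  induction row generalizing ks with
  | nil => simp
  | cons b rest ih =>
      rw [List.foldl_cons, ih]
      simp [PySem.Set.mem_update, PySem.Set.mem_ofList]
      tauto

lemma nodup_keysFold (row : List (List Int)) (ks : PySem.Set Int) (h : ks.Nodup) :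
    (row.foldl (fun ks blk => PySem.Set.update ks (PySem.Set.ofList blk)) ks).Nodup := by
  induction row generalizing ks with
  | nil => exact h
  | cons b rest ih => exact ih _ (PySem.Set.nodup_update _ _ h)

lemma tally_keys_nodup (row : List (List Int)) : (pvTally row).keys.Nodup := by
  unfold pvTally
  rw [tally_keys_aux]
  exact nodup_keysFold _ _ (by simp [PySem.Dict.empty, PySem.Dict.keys])

lemma mem_tally_keys (row : List (List Int)) (v : Int) :
    v ∈ (pvTally row).keys ↔ ∃ blk ∈ row, v ∈ blk := by
  unfold pvTally
  rw [tally_keys_aux, mem_keysFold]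
  simp [PySem.Dict.empty, PySem.Dict.keys]

-- the early-return loop, characterised through the items that hit the count
lemma findSole_some (k x : Int) (items : List (Int × Int)) :
    pvFindSole k items (some x)
      = if items.filter (fun p => decide (p.2 = k)) = [] then some x else none := by
  induction items with
  | nil => simp [pvFindSole]
  | cons p rest ih =>
      obtain ⟨y, c⟩ := p
      by_cases hc : c = k
      · simp [pvFindSole, hc]
      · have h2 : ((y, c) :: rest).filter (fun p => decide (p.2 = k))
            = rest.filter (fun p => decide (p.2 = k)) := by simp [hc]
        simp only [pvFindSole, if_neg hc, ih, h2]

lemma findSole_none (k : Int) (items : List (Int × Int)) :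
    pvFindSole k items none
      = match items.filter (fun p => decide (p.2 = k)) with
        | [(x, _)] => some x
        | _ => none := by
  induction items with
  | nil => simp [pvFindSole]
  | cons p rest ih =>
      obtain ⟨y, c⟩ := p
      by_cases hc : c = k
      · simp only [pvFindSole, findSole_some, List.filter_cons, hc,
          decide_true]
        rcases hrest : rest.filter (fun p => decide (p.2 = k)) with _ | ⟨q, t⟩ <;> simp [hrest]
      · have h2 : ((y, c) :: rest).filter (fun p => decide (p.2 = k))
            = rest.filter (fun p => decide (p.2 = k)) := by simp [hc]
        simp only [pvFindSole, if_neg hc, ih, h2]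

-- B's per-row sole element is exactly "A's row intersection, when it is a singleton"
lemma soleCommon_eq (row : List (List Int)) :
    pvSoleCommon row
      = if (pvMeet row).length = 1 then some ((pvMeet row).headD 0) else none := by
  cases row with
  | nil => rfl
  | cons b rest =>
      -- S: the tally keys hitting the block count; T: A's intersection
      set T : List Int := pvMeet (b :: rest) with hT
      have hTfilter : T = (PySem.Set.ofList b).filter (fun x => rest.all (fun blk => blk.contains x)) := by
        rw [hT]; exact foldl_inter_eq_filter rest _
      set S : List Int := (pvTally (b :: rest)).keys.filter
        (fun v => decide ((pvTally (b :: rest)).getD v 0 = ((b :: rest).length : Int))) with hS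
      have hgetD : ∀ v, (pvTally (b :: rest)).getD v 0
          = ((b :: rest).countP (fun blk => decide (v ∈ blk)) : Int) := by
        intro v
        have h := tally_getD (b :: rest) PySem.Dict.empty v
        unfold pvTally
        rw [h]
        show (0 : Int) + _ = _
        exact zero_add _
      -- items → keys
      have hitems : (pvTally (b :: rest)).items
          = (pvTally (b :: rest)).keys.map (fun v => (v, (pvTally (b :: rest)).getD v 0)) :=
        PySem.Dict.items_eq_map_keys _ (tally_keys_nodup _) 0
      have hfil : (pvTally (b :: rest)).items.filter (fun p => decide (p.2 = ((b :: rest).length : Int)))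
          = S.map (fun v => (v, (pvTally (b :: rest)).getD v 0)) := by
        rw [hitems, List.filter_map, hS]
        rfl
      -- membership in S ↔ membership in T
      have hmem : ∀ v, v ∈ S ↔ v ∈ T := by
        intro v
        rw [hS, hTfilter]
        simp only [List.mem_filter, decide_eq_true_eq, mem_tally_keys, hgetD, Nat.cast_inj,
          PySem.Set.mem_ofList, List.all_eq_true, List.contains_iff_mem, List.countP_eq_length,
          decide_eq_true_eq]
        constructor
        · rintro ⟨-, hall⟩
          exact ⟨hall b (by simp), fun blk hblk => hall blk (by simp [hblk])⟩
        · rintro ⟨hvb, hall⟩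
          refine ⟨⟨b, by simp, hvb⟩, ?_⟩
          intro blk hblk
          rcases List.mem_cons.mp hblk with h | h
          · exact h ▸ hvb
          · exact hall blk h
      -- nodup on both sides, hence a permutation
      have hSnd : S.Nodup := (tally_keys_nodup _).filter _
      have hTnd : T.Nodup := by rw [hTfilter]; exact (PySem.Set.nodup_ofList b).filter _
      have hperm : S.Perm T := (List.perm_ext_iff_of_nodup hSnd hTnd).mpr hmem
      -- now compute both sides through the filtered items
      show pvFindSole ((b :: rest).length : Int) (pvTally (b :: rest)).items none = _
      rw [findSole_none, hfil]
      by_cases hlen : T.length = 1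
      · obtain ⟨a, ha⟩ := List.length_eq_one_iff.mp hlen
        have hSa : S = [a] := List.perm_singleton.mp (ha ▸ hperm)
        rw [hSa, ha]
        simp
      · have hlenS : S.length = T.length := hperm.length_eq
        rw [if_neg hlen]
        rcases hScases : S with _ | ⟨x, _ | ⟨y, t⟩⟩
        · simp
        · exfalso; apply hlen; rw [← hlenS, hScases]; rfl
        · simp

-- A's pyGetD into the precomputed intersection list is pvMeet of the row
lemma pyGetD_rowInters (m : List (List (List Int))) (i : Int)
    (h0 : 0 ≤ i) (h1 : i < m.length) :
    PySem.List.pyGetD (pvRowInters m) i [] = pvMeet (PySem.List.pyGetD m i []) := by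
  have h1m : i < ((pvRowInters m).length : Int) := by simp [pvRowInters]; omega
  rw [PySem.List.pyGetD_eq_getElem _ _ h0 h1m, PySem.List.pyGetD_eq_getElem _ _ h0 (by exact_mod_cast h1)]
  simp [pvRowInters]

-- B's zip of matrix1 with reversed matrix2 is A's reversed-index mapping, elementwise
lemma zip_reverse_eq_map_range (m1 m2 : List (List (List Int)))
    (hpre : m1.length = m2.length) :
    m1.zip m2.reverse
      = (PySem.List.pyRange 0 (m1.length : Int) 1).map
          (fun i => (PySem.List.pyGetD m1 i [], PySem.List.pyGetD m2 ((m1.length : Int) - 1 - i) [])) := by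
  apply List.ext_getElem
  · simp [PySem.List.length_pyRange_one, hpre]
  · intro j h1 h2
    have hj : j < m1.length := by simpa [hpre] using h1
    rw [List.getElem_zip, List.getElem_map, PySem.List.getElem_pyRange_one]
    have hz : (0 : Int) + (j : Int) = (j : Int) := by ring
    rw [hz]
    have e1 : PySem.List.pyGetD m1 (j : Int) [] = m1[j] := by
      rw [PySem.List.pyGetD_eq_getElem _ _ (by positivity) (by exact_mod_cast hj)]
      simp
    have e2 : PySem.List.pyGetD m2 ((m1.length : Int) - 1 - (j : Int)) [] = m2.reverse[j]'(by simpa [hpre] using hj) := by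
      have hb0 : (0 : Int) ≤ (m1.length : Int) - 1 - (j : Int) := by omega
      have hb1 : (m1.length : Int) - 1 - (j : Int) < (m2.length : Int) := by omega
      rw [PySem.List.pyGetD_eq_getElem _ _ hb0 hb1, List.getElem_reverse]
      congr 1
      omega
    rw [e1, e2]

-- ===== VERDICT (by name: the statement is the Claim_ definition above) =====
theorem dependent_unique_solutions_spec : Claim_equal_dependent_unique_solutions := by
  intro m1 m2 _ hpre
  unfold Pre_dependent_unique_solutions at hpre
  unfold Spec_dependent_unique_solutions dependent_unique_solutions dependent_unique_solutions_alt
  rw [zip_reverse_eq_map_range m1 m2 hpre, List.foldl_map, List.foldl_map]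
  apply PySem.List.foldl_congr_mem
  intro acc i hi
  have hrange := (PySem.List.mem_pyRange_one).1 hi
  have h0 : 0 ≤ i := hrange.1
  have h1 : i < (m1.length : Int) := hrange.2
  have h2 : 0 ≤ (m1.length : Int) - 1 - i := by omega
  have h3 : (m1.length : Int) - 1 - i < (m2.length : Int) := by omega
  rw [pyGetD_rowInters m1 i h0 h1, pyGetD_rowInters m2 _ h2 h3]
  rw [soleCommon_eq, soleCommon_eq]
  by_cases ha : (pvMeet (PySem.List.pyGetD m1 i [])).length = 1 <;>
    by_cases hb : (pvMeet (PySem.List.pyGetD m2 ((m1.length : Int) - 1 - i) [])).length = 1 <;>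
      simp [ha, hb]
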